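-- pv_equiv track=rewrite | github.com/omegagussan/advent_of_code.py | src/2023/days/day13/main.py | find_fold_tolerate_error
-- ===== SOURCE A (Python) =====
-- def flatmap(reverse):
-- 	return [a for b in reverse for a in b]
--
-- def find_fold_tolerate_error(mat, horizontal=True):
-- 	for i in range(1, len(mat)):
-- 		top = mat[:i]
-- 		bottom = mat[i:]
-- 		assert len(top) + len(bottom) == len(mat)
-- 		overlap = min(i, len(mat) - i)
-- 		reverse = bottom[:overlap][::-1]
-- 		flatmap_reversed = flatmap(reverse)
-- 		errors = [0 if flatmap(top[-overlap:])[i] == flatmap_reversed[i] else 1 for i in range(len(flatmap_reversed))]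
-- 		if sum(errors) == 1:
-- 			return 100 * i if horizontal else i
-- 	return 0
-- ===== SOURCE B (Python) =====
-- def find_fold_tolerate_error(mat, horizontal=True):
--     n = len(mat)
--     pref = [0]
--     for row in mat:
--         pref.append(pref[-1] + len(row))
--     flat = [c for row in mat for c in row]
--     for i in range(1, n):
--         k = min(i, n - i)
--         base = pref[i - k]
--         errs = 0
--         for r in range(i, i + k):
--             off = base + (pref[i + k] - pref[r + 1])
--             row = mat[r]
--             for c in range(len(row)):
--                 if flat[off + c] != row[c]:
--                     errs += 1
--                     if errs > 1:
--                         break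
--             if errs > 1:
--                 break
--         if errs == 1:
--             return 100 * i if horizontal else i
--     return 0
-- ===== Notes on version B (the rewrite author's own statement) =====
-- stated objective: faster
-- what changed: A materialises, for every fold line and for every compared index, freshly flattened top and reversed-bottom lists and sums a 0/1 list; B builds no per-fold lists at all: it flattens once with row-prefix offsets and, per fold, walks the bottom rows in place, comparing each row against its mirror segment of the flat array via offset arithmetic while keeping a capped error counter that short-circuits as soon as a second mismatch is seen.
-- outside the precondition, e.g. on find_fold_tolerate_error([[0], [1], [2, 3]], True): A returns 100, B returns 100
import Mathlib
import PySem

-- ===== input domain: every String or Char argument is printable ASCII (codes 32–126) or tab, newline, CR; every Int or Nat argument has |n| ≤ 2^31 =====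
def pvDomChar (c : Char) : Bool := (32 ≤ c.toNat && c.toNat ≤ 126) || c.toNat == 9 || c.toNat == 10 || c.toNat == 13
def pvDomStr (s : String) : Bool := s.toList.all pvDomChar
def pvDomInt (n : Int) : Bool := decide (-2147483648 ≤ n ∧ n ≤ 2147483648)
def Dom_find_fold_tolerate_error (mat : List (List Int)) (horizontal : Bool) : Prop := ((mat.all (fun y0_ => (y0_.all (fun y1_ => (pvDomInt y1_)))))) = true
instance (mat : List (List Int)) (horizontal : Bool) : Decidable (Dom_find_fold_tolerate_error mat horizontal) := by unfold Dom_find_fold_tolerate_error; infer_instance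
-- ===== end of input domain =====

-- B builds no per-fold lists: one flat array with row-prefix offsets, per fold it compares each
-- bottom row in place against its mirror segment by offset arithmetic, with a capped error
-- counter that stops at the second mismatch.

-- ===== PORT A =====
-- [a for b in reverse for a in b]
def pvFlatmap (reverse : List (List Int)) : List Int :=
  reverse.flatMap (fun b => b.map (fun a => a))

-- the body of A's loop for one fold index i: sum(errors)
def pvErrSumA (mat : List (List Int)) (i : Int) : Int :=
  let top := PySem.List.slice mat none (some i)
  let bottom := PySem.List.slice mat (some i) none
  let overlap : Int := min i ((mat.length : Int) - i)
  let reverse := (PySem.List.slice bottom none (some overlap)).reverse   -- bottom[:overlap][::-1]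
  let flatmap_reversed := pvFlatmap reverse
  let errors := (PySem.List.pyRange 0 (flatmap_reversed.length : Int) 1).map
    (fun j => if PySem.List.pyGetD (pvFlatmap (PySem.List.slice top (some (-overlap)) none)) j 0
                 == PySem.List.pyGetD flatmap_reversed j 0 then (0 : Int) else 1)
  errors.sum

-- A's 'for i in range(1, len(mat))' with early return
def pvLoopA (mat : List (List Int)) (horizontal : Bool) : List Int → Int
  | [] => 0
  | i :: rest =>
      if pvErrSumA mat i == 1 then (if horizontal then 100 * i else i)
      else pvLoopA mat horizontal rest

def find_fold_tolerate_error (mat : List (List Int)) (horizontal : Bool) : Int :=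
  pvLoopA mat horizontal (PySem.List.pyRange 1 (mat.length : Int) 1)

-- ===== PORT B =====
-- pref = [0]; for row in mat: pref.append(pref[-1] + len(row))
def pvPref (mat : List (List Int)) : List Int :=
  mat.foldl (fun p row => p ++ [PySem.List.pyGetD p (-1) 0 + (row.length : Int)]) [(0 : Int)]

-- for c in range(len(row)): if flat[off+c] != row[c]: errs += 1; if errs > 1: break
def pvCellLoop (flat row : List Int) (off : Int) (errs : Int) : List Int → Int
  | [] => errs
  | c :: rest =>
      if !(PySem.List.pyGetD flat (off + c) 0 == PySem.List.pyGetD row c 0) then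
        (if errs + 1 > 1 then errs + 1 else pvCellLoop flat row off (errs + 1) rest)
      else pvCellLoop flat row off errs rest

-- for r in range(i, i+k): … ; if errs > 1: break
def pvRowLoop (mat : List (List Int)) (pref flat : List Int) (i k base : Int) (errs : Int) :
    List Int → Int
  | [] => errs
  | r :: rest =>
      let off := base + (PySem.List.pyGetD pref (i + k) 0 - PySem.List.pyGetD pref (r + 1) 0)
      let row := PySem.List.pyGetD mat r []
      let errs' := pvCellLoop flat row off errs (PySem.List.pyRange 0 (row.length : Int) 1)
      if errs' > 1 then errs' else pvRowLoop mat pref flat i k base errs' rest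

-- B's 'for i in range(1, n)' with early return
def pvLoopB (mat : List (List Int)) (horizontal : Bool) (pref flat : List Int) : List Int → Int
  | [] => 0
  | i :: rest =>
      let k := min i ((mat.length : Int) - i)
      let base := PySem.List.pyGetD pref (i - k) 0
      let errs := pvRowLoop mat pref flat i k base 0 (PySem.List.pyRange i (i + k) 1)
      if errs == 1 then (if horizontal then 100 * i else i) else pvLoopB mat horizontal pref flat rest

def find_fold_tolerate_error_alt (mat : List (List Int)) (horizontal : Bool) : Int :=
  let pref := pvPref mat
  let flat := mat.flatMap (fun row => row.map (fun c => c))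
  pvLoopB mat horizontal pref flat (PySem.List.pyRange 1 (mat.length : Int) 1)

-- ===== PRECONDITION & SPEC =====
-- Pre_ excludes (ragged) matrices on which some fold line's flattened top overlap is shorter
-- than its flattened bottom overlap: on such a fold A raises IndexError (unless an earlier
-- fold already returned, in which case A and B in fact agree anyway).
def Pre_find_fold_tolerate_error (mat : List (List Int)) (horizontal : Bool) : Prop :=
  ∀ j : Nat, j < mat.length → 1 ≤ j →
    (((mat.drop j).take (min j (mat.length - j))).map List.length).sum ≤
      (((mat.drop (j - min j (mat.length - j))).take (min j (mat.length - j))).map List.length).sum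
instance (mat : List (List Int)) (horizontal : Bool) : Decidable (Pre_find_fold_tolerate_error mat horizontal) := by
  unfold Pre_find_fold_tolerate_error; infer_instance

def pvWitness_find_fold_tolerate_error : List (List Int) × Bool := ([[1, 2], [1, 3]], true)

def Spec_find_fold_tolerate_error (mat : List (List Int)) (horizontal : Bool) (out : Int) : Prop := out = find_fold_tolerate_error_alt mat horizontal
instance (mat : List (List Int)) (horizontal : Bool) (out : Int) : Decidable (Spec_find_fold_tolerate_error mat horizontal out) := by unfold Spec_find_fold_tolerate_error; infer_instance

-- ===== CLAIM (what is proved, stated in full; the proofs are below) =====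
def Claim_equal_find_fold_tolerate_error : Prop := ∀ (mat : List (List Int)) (horizontal : Bool), Dom_find_fold_tolerate_error mat horizontal → Pre_find_fold_tolerate_error mat horizontal → Spec_find_fold_tolerate_error mat horizontal (find_fold_tolerate_error mat horizontal)

-- ===== LEMMAS AND PROOFS =====

-- mismatch predicate on a zipped pair
def pvMis (q : Int × Int) : Bool := !(q.1 == q.2)

-- prefix sum of row lengths up to row t
def pvW (mat : List (List Int)) (t : Nat) : Nat := ((mat.take t).map List.length).sum

-- total number of cells of a row block
def pvLenF (rows : List (List Int)) : Nat := (rows.map List.length).sum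

-- B's per-fold total in row-by-row form: each row against its mirror segment of X
def pvSumRows (X : List Int) : List (List Int) → Nat
  | [] => 0
  | r :: rs => ((X.drop (pvLenF rs)).zip r).countP pvMis + pvSumRows X rs

-- the exact contents of B's running prefix list
def pvScan (x : Int) : List (List Int) → List Int
  | [] => [x]
  | r :: rs => x :: pvScan (x + r.length) rs

lemma pvScan_fold : ∀ (rows : List (List Int)) (acc : List Int) (x : Int),
    rows.foldl (fun p row => p ++ [PySem.List.pyGetD p (-1) 0 + (row.length : Int)]) (acc ++ [x])
      = acc ++ pvScan x rows := by
  intro rows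
  induction rows with
  | nil => intro acc x; simp [pvScan]
  | cons r rs ih =>
      intro acc x
      simp only [List.foldl_cons, PySem.List.pyGetD_neg_one_append_singleton]
      have h := ih (acc ++ [x]) (x + r.length)
      simp only [List.append_assoc] at h ⊢
      rw [h]
      simp [pvScan]

lemma pvScan_getD : ∀ (rows : List (List Int)) (x : Int) (t : Nat), t ≤ rows.length →
    (pvScan x rows).getD t 0 = x + (pvW rows t : Int) := by
  intro rows
  induction rows with
  | nil => intro x t ht; simp at ht; subst ht; simp [pvScan, pvW]
  | cons r rs ih =>
      intro x t ht
      cases t with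
      | zero => simp [pvScan, pvW]
      | succ t =>
          simp only [pvScan, List.getD_cons_succ]
          rw [ih (x + r.length) t (by simpa using ht)]
          simp [pvW, List.take_succ_cons]
          ring

lemma pvPref_getD (mat : List (List Int)) (t : Nat) (ht : t ≤ mat.length) :
    PySem.List.pyGetD (pvPref mat) (t : Int) 0 = (pvW mat t : Int) := by
  have h0 : pvPref mat = pvScan 0 mat := by
    have h := pvScan_fold mat [] 0
    simpa [pvPref] using h
  rw [h0, PySem.List.pyGetD_natCast, pvScan_getD mat 0 t ht]
  ring

lemma pvFlatmap_length (l : List (List Int)) : (pvFlatmap l).length = pvLenF l := by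
  simp [pvFlatmap, pvLenF]

-- A's 0/1 indicator sum over indices = countP over the zip (needs |ys| ≤ |xs|)
lemma pvAux_sum (ys xs : List Int) (h : ys.length ≤ xs.length) :
    ((List.range ys.length).map (fun j => if xs.getD j 0 == ys.getD j 0 then (0 : Int) else 1)).sum
      = ((xs.zip ys).countP pvMis : Int) := by
  induction ys generalizing xs with
  | nil => simp
  | cons y ys ih =>
      cases xs with
      | nil => simp at h
      | cons x xs =>
          simp only [List.length_cons, List.range_succ_eq_map, List.map_cons, List.map_map,
            List.sum_cons, List.zip_cons_cons, List.countP_cons]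
          have hrec := ih xs (by simpa using h)
          have h2 : ((fun j => if ((x :: xs).getD j 0 == (y :: ys).getD j 0) = true then (0 : Int) else 1) ∘ Nat.succ)
              = (fun j => if (xs.getD j 0 == ys.getD j 0) = true then (0 : Int) else 1) := by
            funext j; rfl
          rw [h2, hrec]
          by_cases hxy : x = y <;> simp [hxy, pvMis] <;> ring

lemma pvSum_eq_countP (xs ys : List Int) (h : ys.length ≤ xs.length) :
    ((PySem.List.pyRange 0 (ys.length : Int) 1).map
        (fun j => if PySem.List.pyGetD xs j 0 == PySem.List.pyGetD ys j 0 then (0 : Int) else 1)).sum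
      = ((xs.zip ys).countP pvMis : Int) := by
  rw [PySem.List.pyRange_zero_natCast, List.map_map]
  have hc : ((fun j => if PySem.List.pyGetD xs j 0 == PySem.List.pyGetD ys j 0 then (0 : Int) else 1)
        ∘ (fun k : Nat => (k : Int)))
      = (fun j : Nat => if xs.getD j 0 == ys.getD j 0 then (0 : Int) else 1) := by
    funext j; simp [PySem.List.pyGetD_natCast]
  rw [hc, pvAux_sum ys xs h]

-- A's body in canonical form
lemma pvErrSumA_eq (mat : List (List Int)) (j k : Nat) (h1 : 1 ≤ j) (h2 : j < mat.length)
    (hkdef : k = min j (mat.length - j))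
    (hpre : (((mat.drop j).take k).map List.length).sum ≤
      (((mat.drop (j - k)).take k).map List.length).sum) :
    pvErrSumA mat (j : Int) =
      (((pvFlatmap ((mat.drop (j - k)).take k)).zip
          (pvFlatmap (((mat.drop j).take k).reverse))).countP pvMis : Int) := by
  have hk1 : 1 ≤ k := by omega
  have hmin : min ((j : Nat) : Int) ((mat.length : Int) - ((j : Nat) : Int)) = ((k : Nat) : Int) := by
    rw [show ((mat.length : Int) - (j : Int)) = ((mat.length - j : Nat) : Int) by omega,
      ← Nat.cast_min, hkdef]
  simp only [pvErrSumA, hmin, PySem.List.slice_to_natCast, PySem.List.slice_from_natCast]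
  rw [PySem.List.slice_from_neg_natCast _ k hk1]
  have hlt : (mat.take j).length = j := by simp; omega
  rw [hlt]
  have hdt : (mat.take j).drop (j - k) = (mat.drop (j - k)).take k := by
    rw [List.drop_take]; congr 1; omega
  rw [hdt]
  have hlenle : (pvFlatmap (((mat.drop j).take k).reverse)).length
      ≤ (pvFlatmap ((mat.drop (j - k)).take k)).length := by
    simp [pvFlatmap, List.map_reverse]
    simpa using hpre
  exact pvSum_eq_countP _ _ hlenle

-- zip against a truncated left list is the full zip when the right list fits
lemma pvZip_take_of_le : ∀ (r : List Int) (X : List Int) (m : Nat), r.length ≤ m →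
    (X.take m).zip r = X.zip r := by
  intro r
  induction r with
  | nil => intro X m _; simp
  | cons a r ih =>
      intro X m hm
      cases X with
      | nil => simp
      | cons x X =>
          cases m with
          | zero => simp at hm
          | succ m => simp [List.zip_cons_cons, ih X m (by simpa using hm)]

-- splitting a zip at a block boundary
lemma pvZip_append_countP : ∀ (as : List Int) (X bs : List Int), as.length ≤ X.length →
    ((X.zip (as ++ bs)).countP pvMis)
      = (X.zip as).countP pvMis + ((X.drop as.length).zip bs).countP pvMis := by
  intro as
  induction as with
  | nil => intro X bs _; simp
  | cons a as ih =>
      intro X bs h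
      cases X with
      | nil => simp at h
      | cons x X =>
          simp only [List.cons_append, List.zip_cons_cons, List.countP_cons, List.drop_succ_cons,
            List.length_cons]
          rw [ih X bs (by simpa using h)]
          omega

-- A's zipped count, decomposed row by row (rows ascending, each offset = cells of the later rows)
lemma pvZipRev : ∀ (rows : List (List Int)) (X : List Int), pvLenF rows ≤ X.length →
    ((X.zip (pvFlatmap rows.reverse)).countP pvMis) = pvSumRows X rows := by
  intro rows
  induction rows with
  | nil => intro X _; simp [pvFlatmap, pvSumRows]
  | cons r rs ih =>
      intro X h
      have hsplit : pvFlatmap ((r :: rs).reverse) = pvFlatmap rs.reverse ++ r := by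
        simp [pvFlatmap, List.flatMap_append]
      have hlen : (pvFlatmap rs.reverse).length = pvLenF rs := by
        rw [pvFlatmap_length]; simp [pvLenF, List.map_reverse]
      have hrs : pvLenF rs ≤ X.length := by simp [pvLenF] at h ⊢; omega
      rw [hsplit, pvZip_append_countP _ _ _ (by rw [hlen]; exact hrs), ih X hrs, hlen]
      simp only [pvSumRows]
      omega

-- the indexed mismatch count is the zipped mismatch count
lemma pvCnt_zip : ∀ (ys xs : List Int), ys.length ≤ xs.length →
    (List.range ys.length).countP (fun c => !(xs.getD c 0 == ys.getD c 0))
      = (xs.zip ys).countP pvMis := by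
  intro ys
  induction ys with
  | nil => intro xs _; simp
  | cons y ys ih =>
      intro xs h
      cases xs with
      | nil => simp at h
      | cons x xs =>
          rw [List.length_cons, List.range_succ_eq_map, List.countP_cons, List.countP_map]
          have h2 : ((fun c => !((x :: xs).getD c 0 == (y :: ys).getD c 0)) ∘ Nat.succ)
              = (fun c => !(xs.getD c 0 == ys.getD c 0)) := by
            funext c; rfl
          rw [h2, ih xs (by simpa using h)]
          simp only [List.zip_cons_cons, List.countP_cons]
          have h3 : (!((x :: xs).getD 0 0 == (y :: ys).getD 0 0)) = pvMis (x, y) := rfl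
          rw [h3]

-- getD through drop
lemma pvGetD_drop (l : List Int) (b c : Nat) : (l.drop b).getD c 0 = l.getD (b + c) 0 := by
  simp [List.getD_eq_getElem?_getD, List.getElem?_drop]

-- pvW is additive over a split
lemma pvW_add (mat : List (List Int)) (a m : Nat) :
    pvW mat (a + m) = pvW mat a + pvLenF ((mat.drop a).take m) := by
  simp [pvW, pvLenF, List.take_add]

-- the flat list, cut at row boundaries, is the flattened row window
lemma pvFlat_seg (mat : List (List Int)) (a b : Nat) (hab : a ≤ b) (hb : b ≤ mat.length) :
    ((pvFlatmap mat).drop (pvW mat a)).take (pvW mat b - pvW mat a)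
      = pvFlatmap ((mat.drop a).take (b - a)) := by
  have hsplit : pvFlatmap mat = pvFlatmap (mat.take a) ++ pvFlatmap (mat.drop a) := by
    rw [show pvFlatmap (mat.take a) ++ pvFlatmap (mat.drop a)
          = pvFlatmap (mat.take a ++ mat.drop a) from (List.flatMap_append).symm]
    simp [pvFlatmap]
  have hlen : (pvFlatmap (mat.take a)).length = pvW mat a := by
    simp [pvFlatmap_length, pvLenF, pvW]
  rw [hsplit, List.drop_append_of_le_length (by omega), List.drop_of_length_le (by omega)]
  simp only [List.nil_append]
  have hW : pvW mat b = pvW mat a + (((mat.drop a).take (b - a)).map List.length).sum := by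
    have hb' : b = a + (b - a) := by omega
    rw [pvW, pvW, hb', List.take_add]
    simp
  have hsplit2 : pvFlatmap (mat.drop a) =
      pvFlatmap ((mat.drop a).take (b - a)) ++ pvFlatmap ((mat.drop a).drop (b - a)) := by
    rw [show pvFlatmap ((mat.drop a).take (b - a)) ++ pvFlatmap ((mat.drop a).drop (b - a))
          = pvFlatmap ((mat.drop a).take (b - a) ++ (mat.drop a).drop (b - a)) from (List.flatMap_append).symm]
    simp
  rw [hsplit2]
  rw [show pvW mat b - pvW mat a = (pvFlatmap ((mat.drop a).take (b - a))).length by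
        rw [pvFlatmap_length]; simp only [pvLenF]; omega]
  exact List.take_left

-- the inner cell loop computes the capped mismatch count of its index list
lemma pvCellLoop_cap (flat row : List Int) (off : Int) :
    ∀ (cs : List Int) (errs : Int), 0 ≤ errs → errs ≤ 1 →
      pvCellLoop flat row off errs cs
        = min (errs + (cs.countP
            (fun c => !(PySem.List.pyGetD flat (off + c) 0 == PySem.List.pyGetD row c 0)) : Int)) 2 := by
  intro cs
  induction cs with
  | nil => intro errs h0 h1; simp [pvCellLoop]; omega
  | cons c rest ih =>
      intro errs h0 h1
      simp only [pvCellLoop, List.countP_cons]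
      by_cases hm : (!(PySem.List.pyGetD flat (off + c) 0 == PySem.List.pyGetD row c 0)) = true
      · rw [if_pos hm, hm]
        by_cases he : errs + 1 > 1
        · rw [if_pos he]
          have hcnt : (0 : Int) ≤ (rest.countP
              (fun c => !(PySem.List.pyGetD flat (off + c) 0 == PySem.List.pyGetD row c 0)) : Int) := by
            positivity
          simp only [gt_iff_lt] at he
          norm_num
          push_cast
          omega
        · rw [if_neg he, ih (errs + 1) (by omega) (by omega)]
          norm_num
          push_cast
          omega
      · rw [if_neg hm, ih errs h0 h1]
        simp only [Bool.not_eq_true] at hm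
        rw [hm]
        norm_num

-- the capped cell count of one row, as a zip against the mirror segment of flat
lemma pvCellLoop_row (flat row : List Int) (b : Nat) (errs : Int)
    (h0 : 0 ≤ errs) (h1 : errs ≤ 1) (hb : b + row.length ≤ flat.length) :
    pvCellLoop flat row ((b : Nat) : Int) errs
        (PySem.List.pyRange 0 ((row.length : Nat) : Int) 1)
      = min (errs + (((flat.drop b).zip row).countP pvMis : Int)) 2 := by
  rw [pvCellLoop_cap _ _ _ _ errs h0 h1]
  have hlen : row.length ≤ (flat.drop b).length := by simp; omega
  have hcnt : ((PySem.List.pyRange 0 ((row.length : Nat) : Int) 1).countP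
      (fun c => !(PySem.List.pyGetD flat (((b : Nat) : Int) + c) 0 == PySem.List.pyGetD row c 0)))
      = ((flat.drop b).zip row).countP pvMis := by
    rw [PySem.List.pyRange_zero_natCast, List.countP_map]
    have hfun : ((fun c => !(PySem.List.pyGetD flat (((b : Nat) : Int) + c) 0 == PySem.List.pyGetD row c 0))
          ∘ (fun k : Nat => (k : Int)))
        = (fun c : Nat => !((flat.drop b).getD c 0 == row.getD c 0)) := by
      funext c
      simp only [Function.comp]
      rw [show ((b : Nat) : Int) + ((c : Nat) : Int) = (((b + c : Nat) : Nat) : Int) by push_cast; ring,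
        PySem.List.pyGetD_natCast, PySem.List.pyGetD_natCast, pvGetD_drop]
    rw [hfun, pvCnt_zip row (flat.drop b) hlen]
  rw [hcnt]

-- the outer row loop computes the capped pvSumRows total
lemma pvRowLoop_sum (mat : List (List Int)) (i k : Nat)
    (hik : i + k ≤ mat.length)
    (hbound : pvLenF ((mat.drop i).take k) + pvW mat (i - k) ≤ pvW mat i) :
    ∀ (m j : Nat), j + m = i + k → i ≤ j → ∀ (errs : Int), 0 ≤ errs → errs ≤ 1 →
      pvRowLoop mat (pvPref mat) (pvFlatmap mat) ((i : Nat) : Int) ((k : Nat) : Int)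
          ((pvW mat (i - k) : Nat) : Int) errs
          (PySem.List.pyRange ((j : Nat) : Int) (((i : Nat) : Int) + ((k : Nat) : Int)) 1)
        = min (errs + (pvSumRows
            (((pvFlatmap mat).drop (pvW mat (i - k))).take (pvW mat i - pvW mat (i - k)))
            ((mat.drop j).take m) : Int)) 2 := by
  intro m
  induction m with
  | zero =>
      intro j hjm hij errs h0 h1
      rw [PySem.List.pyRange_one_eq_nil (by push_cast; omega)]
      simp [pvRowLoop, pvSumRows]
      omega
  | succ m ih =>
      intro j hjm hij errs h0 h1
      have hjlt : j < mat.length := by omega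
      have hWj : pvW mat j + (mat[j].length) = pvW mat (j + 1) := by
        have := pvW_add mat j 1
        rw [this]
        have : (mat.drop j).take 1 = [mat[j]] := by
          rw [List.drop_eq_getElem_cons hjlt]; rfl
        rw [this]; simp [pvLenF]
      have hWmono : ∀ a b : Nat, a ≤ b → pvW mat a ≤ pvW mat b := by
        intro a b hab
        have := pvW_add mat a (b - a)
        rw [show a + (b - a) = b by omega] at this
        omega
      have hWlen : pvW mat (mat.length) = (pvFlatmap mat).length := by
        rw [pvFlatmap_length]; simp [pvW, pvLenF, List.take_of_length_le (le_refl mat.length)]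
      -- abbreviations
      have hcons : PySem.List.pyRange ((j : Nat) : Int) (((i : Nat) : Int) + ((k : Nat) : Int)) 1
          = ((j : Nat) : Int) :: PySem.List.pyRange (((j : Nat) : Int) + 1) (((i : Nat) : Int) + ((k : Nat) : Int)) 1 :=
        PySem.List.pyRange_one_cons (by push_cast; omega)
      rw [hcons]
      simp only [pvRowLoop]
      -- the row and the offsets
      have hrow : PySem.List.pyGetD mat ((j : Nat) : Int) ([] : List Int) = mat[j] := by
        rw [PySem.List.pyGetD_natCast, List.getD_eq_getElem mat _ hjlt]
      have hik' : PySem.List.pyGetD (pvPref mat) (((i : Nat) : Int) + ((k : Nat) : Int)) 0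
          = ((pvW mat (i + k) : Nat) : Int) := by
        rw [show ((i : Nat) : Int) + ((k : Nat) : Int) = ((i + k : Nat) : Int) by push_cast; ring]
        exact pvPref_getD mat (i + k) hik
      have hj1 : PySem.List.pyGetD (pvPref mat) (((j : Nat) : Int) + 1) 0
          = ((pvW mat (j + 1) : Nat) : Int) := by
        rw [show ((j : Nat) : Int) + 1 = ((j + 1 : Nat) : Int) by push_cast; ring]
        exact pvPref_getD mat (j + 1) (by omega)
      rw [hrow, hik', hj1]
      -- the Int offset is the cast of a Nat offset b
      have hWj1 : pvW mat (j + 1) ≤ pvW mat (i + k) := hWmono _ _ (by omega)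
      set b : Nat := pvW mat (i - k) + (pvW mat (i + k) - pvW mat (j + 1)) with hbdef
      have hoff : ((pvW mat (i - k) : Nat) : Int) + (((pvW mat (i + k) : Nat) : Int) - ((pvW mat (j + 1) : Nat) : Int))
          = ((b : Nat) : Int) := by rw [hbdef]; push_cast; omega
      rw [hoff]
      -- cell loop: capped zip count at offset b
      have hseg : pvW mat (i + k) - pvW mat i ≤ pvW mat i - pvW mat (i - k) := by
        have := pvW_add mat i k
        omega
      have hblen : b + (mat[j].length) ≤ (pvFlatmap mat).length := by
        have h1' : pvW mat (i + k) - pvW mat (j + 1) + mat[j].length = pvW mat (i + k) - pvW mat j := by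
          have := hWmono j (j + 1) (by omega); omega
        have h2' : pvW mat i ≤ pvW mat j := hWmono _ _ hij
        have h3' : pvW mat j ≤ pvW mat (mat.length) := hWmono _ _ (by omega)
        omega
      rw [pvCellLoop_row (pvFlatmap mat) (mat[j]) b errs h0 h1 hblen]
      -- unfold the row window on the pvSumRows side
      have hwin : (mat.drop j).take (m + 1) = mat[j] :: (mat.drop (j + 1)).take m := by
        rw [List.drop_eq_getElem_cons hjlt]; rfl
      rw [hwin]
      simp only [pvSumRows]
      -- the tail cell total is the fixed global offset
      have htail : pvLenF ((mat.drop (j + 1)).take m) = pvW mat (i + k) - pvW mat (j + 1) := by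
        have := pvW_add mat (j + 1) m
        rw [show j + 1 + m = i + k by omega] at this
        omega
      -- identify the zipped counts: X.drop (lenF tail) zipped with the row = flat.drop b zipped
      have hXdrop : ((((pvFlatmap mat).drop (pvW mat (i - k))).take (pvW mat i - pvW mat (i - k))).drop
            (pvLenF ((mat.drop (j + 1)).take m))).zip (mat[j])
          = ((pvFlatmap mat).drop b).zip (mat[j]) := by
        rw [htail, List.drop_take, ← List.drop_drop]
        rw [show ((pvFlatmap mat).drop (pvW mat (i - k))).drop (pvW mat (i + k) - pvW mat (j + 1))
              = (pvFlatmap mat).drop b by rw [List.drop_drop]]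
        apply pvZip_take_of_le
        have h1' : pvW mat j + mat[j].length = pvW mat (j + 1) := hWj
        have h2' : pvW mat i ≤ pvW mat j := hWmono _ _ hij
        omega
      rw [hXdrop]
      -- close by case analysis on whether the cap is hit at this row
      have hc0 : (0 : Int) ≤ ((((pvFlatmap mat).drop b).zip (mat[j])).countP pvMis : Int) := by positivity
      by_cases hcap : min (errs + (((((pvFlatmap mat).drop b).zip (mat[j])).countP pvMis : Nat) : Int)) 2 > 1
      · rw [if_pos hcap]
        have hrest : (0 : Int) ≤ (pvSumRows
            (((pvFlatmap mat).drop (pvW mat (i - k))).take (pvW mat i - pvW mat (i - k)))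
            ((mat.drop (j + 1)).take m) : Int) := by positivity
        push_cast
        push_cast at hcap
        omega
      · rw [if_neg hcap]
        have herrs' : errs + (((((pvFlatmap mat).drop b).zip (mat[j])).countP pvMis : Nat) : Int) ≤ 1 := by
          omega
        have hmin : min (errs + (((((pvFlatmap mat).drop b).zip (mat[j])).countP pvMis : Nat) : Int)) 2
            = errs + (((((pvFlatmap mat).drop b).zip (mat[j])).countP pvMis : Nat) : Int) := by
          omega
        rw [hmin]
        have := ih (j + 1) (by omega) (by omega)
          (errs + (((((pvFlatmap mat).drop b).zip (mat[j])).countP pvMis : Nat) : Int))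
          (by omega) herrs'
        rw [show (((j : Nat) : Int) + 1) = (((j + 1 : Nat) : Nat) : Int) by push_cast; ring]
        rw [this]
        push_cast
        omega

-- B's per-fold result is A's mismatch count capped at 2
lemma pvFold_eq (mat : List (List Int)) (j k : Nat) (h1 : 1 ≤ j) (h2 : j < mat.length)
    (hkdef : k = min j (mat.length - j))
    (hpre : (((mat.drop j).take k).map List.length).sum ≤
      (((mat.drop (j - k)).take k).map List.length).sum) :
    pvRowLoop mat (pvPref mat) (pvFlatmap mat) ((j : Nat) : Int) ((k : Nat) : Int)
        ((pvW mat (j - k) : Nat) : Int) 0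
        (PySem.List.pyRange ((j : Nat) : Int) (((j : Nat) : Int) + ((k : Nat) : Int)) 1)
      = min (pvErrSumA mat (j : Int)) 2 := by
  have hk1 : 1 ≤ k := by omega
  have hki : k ≤ j := by omega
  have hik : j + k ≤ mat.length := by omega
  have hWseg : pvW mat (j - k) + pvLenF ((mat.drop (j - k)).take k) = pvW mat j := by
    have := pvW_add mat (j - k) k
    rw [show j - k + k = j by omega] at this
    omega
  have hbound : pvLenF ((mat.drop j).take k) + pvW mat (j - k) ≤ pvW mat j := by
    simp only [pvLenF] at *
    omega
  rw [pvRowLoop_sum mat j k hik hbound k j (by omega) (le_refl j) 0 (by omega) (by omega)]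
  rw [pvErrSumA_eq mat j k h1 h2 hkdef hpre]
  have hXlen : pvLenF ((mat.drop j).take k)
      ≤ ((((pvFlatmap mat).drop (pvW mat (j - k))).take (pvW mat j - pvW mat (j - k)))).length := by
    rw [pvFlat_seg mat (j - k) j (by omega) (by omega), pvFlatmap_length,
      show j - (j - k) = k by omega]
    simp only [pvLenF] at *
    omega
  rw [← pvZipRev ((mat.drop j).take k) _ hXlen,
    pvFlat_seg mat (j - k) j (by omega) (by omega), show j - (j - k) = k by omega]
  push_cast
  omega

-- sum(errors) is nonnegative (it is a count)
lemma pvErrSumA_nonneg (mat : List (List Int)) (j k : Nat) (h1 : 1 ≤ j) (h2 : j < mat.length)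
    (hkdef : k = min j (mat.length - j))
    (hpre : (((mat.drop j).take k).map List.length).sum ≤
      (((mat.drop (j - k)).take k).map List.length).sum) :
    0 ≤ pvErrSumA mat (j : Int) := by
  rw [pvErrSumA_eq mat j k h1 h2 hkdef hpre]
  positivity

-- the two loops agree on any list of in-range fold indices
lemma pvLoops_eq (mat : List (List Int)) (horizontal : Bool)
    (hpre : Pre_find_fold_tolerate_error mat horizontal) :
    ∀ l : List Int, (∀ x ∈ l, 1 ≤ x ∧ x < (mat.length : Int)) →
      pvLoopA mat horizontal l =
        pvLoopB mat horizontal (pvPref mat) (mat.flatMap (fun row => row.map (fun c => c))) l := by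
  intro l
  induction l with
  | nil => intro _; rfl
  | cons x rest ih =>
      intro hmem
      obtain ⟨hx1, hx2⟩ := hmem x (List.mem_cons_self)
      have hj : x = ((x.toNat : Nat) : Int) := by omega
      set j : Nat := x.toNat with hjdef
      have h1 : 1 ≤ j := by omega
      have h2 : j < mat.length := by omega
      set k : Nat := min j (mat.length - j) with hkdef
      have hpj := hpre j h2 h1
      rw [← hkdef] at hpj
      simp only [pvLoopA, pvLoopB]
      have hmin : min x ((mat.length : Int) - x) = ((k : Nat) : Int) := by
        rw [hj, show ((mat.length : Int) - ((j : Nat) : Int)) = ((mat.length - j : Nat) : Int) by omega,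
          ← Nat.cast_min, hkdef]
      have hbase : PySem.List.pyGetD (pvPref mat) (x - ((k : Nat) : Int)) 0
          = ((pvW mat (j - k) : Nat) : Int) := by
        rw [hj, show ((j : Nat) : Int) - ((k : Nat) : Int) = ((j - k : Nat) : Int) by
              have : k ≤ j := by omega
              omega]
        exact pvPref_getD mat (j - k) (by omega)
      have hflat : mat.flatMap (fun row => row.map (fun c => c)) = pvFlatmap mat := rfl
      rw [hmin, hbase, hflat]
      have hrl := pvFold_eq mat j k h1 h2 hkdef hpj
      rw [hj] at *
      rw [hrl]
      have hnn := pvErrSumA_nonneg mat j k h1 h2 hkdef hpj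
      have hcond : (min (pvErrSumA mat ((j : Nat) : Int)) 2 == 1)
          = (pvErrSumA mat ((j : Nat) : Int) == 1) := by
        by_cases hv : pvErrSumA mat ((j : Nat) : Int) = 1
        · simp [hv]
        · have : min (pvErrSumA mat ((j : Nat) : Int)) 2 ≠ 1 := by omega
          simp [this, hv]
      rw [hcond]
      split
      · rfl
      · exact ih (fun y hy => hmem y (List.mem_cons_of_mem _ hy))

-- ===== VERDICT (by name: the statement is the Claim_ definition above) =====
theorem find_fold_tolerate_error_spec : Claim_equal_find_fold_tolerate_error := by
  intro mat horizontal _hdom hpre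
  unfold Spec_find_fold_tolerate_error find_fold_tolerate_error find_fold_tolerate_error_alt
  exact pvLoops_eq mat horizontal hpre _ (fun x hx => (PySem.List.mem_pyRange_one.1 hx))
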